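-- pv_equiv track=rewrite | github.com/Ferrrr777/Labirin | app.py | dfs
-- ===== SOURCE A (Python) =====
-- def dfs(maze, start, goal):
--     stack = [(start, [start])]
--     visited = set()
--     explored = []
--     while stack:
--         pos, path = stack.pop()
--         if pos in visited:
--             continue
--         visited.add(pos)
--         explored.append(pos)
--         if pos == goal:
--             return explored, path
--         for dx, dy in [(-1,0),(1,0),(0,-1),(0,1)]:
--             nx, ny = pos[0]+dx, pos[1]+dy
--             if 0 <= nx < 8 and 0 <= ny < 8 and maze[nx][ny] != 1 and (nx, ny) not in visited:
--                 stack.append(((nx, ny), path + [(nx, ny)]))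
--     return explored, None
-- ===== SOURCE B (Python) =====
-- def dfs(maze, start, goal):
--     # Recursive DFS: no path is threaded down; the successful path is built
--     # back-to-front while unwinding (cons on return). Neighbors are visited in
--     # reverse of A's push order, so the traversal (and hence explored and the
--     # chosen path) coincides with A's stack-based one.
--     visited = set()
--     explored = []
--
--     def rec(pos):
--         if pos in visited:
--             return None
--         visited.add(pos)
--         explored.append(pos)
--         if pos == goal:
--             return [pos]
--         x, y = pos
--         for n in ((x, y + 1), (x, y - 1), (x + 1, y), (x - 1, y)):
--             if n not in visited and 0 <= n[0] < 8 and 0 <= n[1] < 8 and maze[n[0]][n[1]] != 1: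
--                 tail = rec(n)
--                 if tail is not None:
--                     return [pos] + tail
--         return None
--
--     return explored, rec(start)
-- ===== Notes on version B (the rewrite author's own statement) =====
-- stated objective: alternative
-- what changed: Replaces A's explicit stack of (position, full-path-copy) pairs by a recursive DFS that threads no path at all: the successful path is assembled back-to-front while unwinding (cons on return), with inline neighbor tuples visited in reverse of A's push order.
-- outside the precondition, e.g. on dfs([[0, 1], [1, 0]], (0, 0), (5, 5)): A returns ([(0, 0)], None), B returns ([(0, 0)], None)
import Mathlib
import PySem

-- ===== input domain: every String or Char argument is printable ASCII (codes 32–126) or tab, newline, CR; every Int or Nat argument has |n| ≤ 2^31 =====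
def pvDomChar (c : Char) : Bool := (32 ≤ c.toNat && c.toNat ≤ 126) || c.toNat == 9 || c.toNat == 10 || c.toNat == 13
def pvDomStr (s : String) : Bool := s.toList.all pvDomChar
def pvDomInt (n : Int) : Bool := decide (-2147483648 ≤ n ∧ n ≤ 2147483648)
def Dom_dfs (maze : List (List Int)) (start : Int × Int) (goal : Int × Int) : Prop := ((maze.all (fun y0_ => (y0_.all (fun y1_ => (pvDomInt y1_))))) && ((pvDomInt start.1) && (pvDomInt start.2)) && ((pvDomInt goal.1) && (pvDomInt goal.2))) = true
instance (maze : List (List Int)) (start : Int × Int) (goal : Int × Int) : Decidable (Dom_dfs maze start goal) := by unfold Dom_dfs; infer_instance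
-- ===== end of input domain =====

-- B replaces A's explicit stack of (position, path-copy) pairs by a recursive DFS that
-- threads no path: the path is built back-to-front on unwinding; same (explored, path) value.
-- ===== shared small helpers (maze geometry and the termination measure) =====

def pvDirsA : List (Int × Int) := [(-1, 0), (1, 0), (0, -1), (0, 1)]

def pvNbr (pos d : Int × Int) : Int × Int := (pos.1 + d.1, pos.2 + d.2)

def pvInBox (n : Int × Int) : Bool :=
  decide (0 ≤ n.1) && decide (n.1 < 8) && decide (0 ≤ n.2) && decide (n.2 < 8)

-- maze[nx][ny]; a missing entry reads as wall 1 (Pre_dfs excludes inputs where Python would index a missing cell)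
def pvCell (maze : List (List Int)) (n : Int × Int) : Int :=
  PySem.List.pyGetD (PySem.List.pyGetD maze n.1 []) n.2 1

-- A's '0 <= nx < 8 and 0 <= ny < 8 and maze[nx][ny] != 1 and (nx, ny) not in visited'
def pvOkA (maze : List (List Int)) (v : PySem.Set (Int × Int)) (n : Int × Int) : Bool :=
  pvInBox n && !(pvCell maze n == 1) && !(PySem.Set.contains v n)

-- ===== termination measure (used by both ports' well-founded recursions) =====

def pvBoxL : List (Int × Int) :=
  (List.range 8).flatMap (fun i => (List.range 8).map (fun j => ((i : Int), (j : Int))))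

def pvBoxS (start : Int × Int) : Finset (Int × Int) := insert start pvBoxL.toFinset

def pvMu (start : Int × Int) (v : PySem.Set (Int × Int)) : Nat :=
  ((pvBoxS start) \ v.toFinset).card

lemma pvMem_boxL (i j : Nat) (hi : i < 8) (hj : j < 8) :
    (((i : Int), (j : Int)) : Int × Int) ∈ pvBoxL := by
  simp [pvBoxL, hi, hj]

lemma pvMem_boxS_of_inBox (start : Int × Int) (n : Int × Int) (h : pvInBox n = true) :
    n ∈ pvBoxS start := by
  obtain ⟨a, b⟩ := n
  simp [pvInBox] at h
  apply Finset.mem_insert_of_mem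
  rw [List.mem_toFinset]
  have hm := pvMem_boxL a.toNat b.toNat (by omega) (by omega)
  rwa [Int.toNat_of_nonneg (by omega), Int.toNat_of_nonneg (by omega)] at hm

lemma pvMu_add_lt (start : Int × Int) (v : PySem.Set (Int × Int)) (pos : Int × Int)
    (hbox : pos ∈ pvBoxS start) (hnm : PySem.Set.contains v pos = false) :
    pvMu start (v ++ [pos]) < pvMu start v := by
  have hpos : pos ∉ v := by
    intro hm
    have h2 : v.contains pos = true := List.contains_iff_mem.mpr hm
    rw [show PySem.Set.contains v pos = v.contains pos from rfl, h2] at hnm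
    cases hnm
  unfold pvMu
  apply Finset.card_lt_card
  have hsub : pvBoxS start \ (v ++ [pos]).toFinset ⊆ pvBoxS start \ v.toFinset := by
    apply Finset.sdiff_subset_sdiff (Finset.Subset.refl _)
    intro x hx
    simp [List.mem_toFinset] at hx ⊢
    tauto
  rw [Finset.ssubset_iff_of_subset hsub]
  refine ⟨pos, ?_, ?_⟩
  · simp [Finset.mem_sdiff, List.mem_toFinset, hbox, hpos]
  · simp [Finset.mem_sdiff, List.mem_toFinset]

lemma pvMu_le_of_subset (start : Int × Int) (v w : PySem.Set (Int × Int))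
    (h : ∀ x ∈ v, x ∈ w) : pvMu start w ≤ pvMu start v := by
  unfold pvMu
  apply Finset.card_le_card
  intro x hx
  simp [Finset.mem_sdiff, List.mem_toFinset] at hx ⊢
  exact ⟨hx.1, fun hm => hx.2 (h x hm)⟩

lemma pvAdd_eq_append (v : PySem.Set (Int × Int)) (pos : Int × Int)
    (h : PySem.Set.contains v pos = false) : PySem.Set.add v pos = v ++ [pos] := by
  simp [PySem.Set.add, PySem.Set.contains] at *; simp_all

-- 'for d in dirs: if ok(d): stack.append(e(d))' — the pushes land reversed at the head
lemma pvFoldlPush {α β : Type} (c : α → Bool) (e : α → β) :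
    ∀ (ds : List α) (init : List β),
      ds.foldl (fun s d => if c d then e d :: s else s) init
        = ((ds.filter c).map e).reverse ++ init := by
  intro ds
  induction ds with
  | nil => intro init; simp
  | cons d ds ih =>
    intro init
    by_cases h : c d = true <;> simp [List.foldl_cons, h, ih]

-- generic bound used only for termination: a fold that adds at most one element per step
lemma pvFoldlLen {α β : Type} (f : List β → α → List β)
    (h : ∀ s a, (f s a).length ≤ s.length + 1) :
    ∀ (ds : List α) (init : List β), (ds.foldl f init).length ≤ init.length + ds.length := by
  intro ds
  induction ds with
  | nil => intro init; simp
  | cons d ds ih =>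
    intro init
    calc (ds.foldl f (f init d)).length ≤ (f init d).length + ds.length := ih _
      _ ≤ init.length + (ds.length + 1) := by have := h init d; omega
      _ = init.length + (d :: ds).length := by simp

lemma pvInBox_of_okA (maze : List (List Int)) (v : PySem.Set (Int × Int)) (n : Int × Int)
    (h : pvOkA maze v n = true) : pvInBox n = true := by
  simp [pvOkA] at h; simp [h]

-- ===== PORT A =====
-- Python's stack (append/pop at the end) is modelled with its top at the list HEAD:
-- pop = head, and the for-loop's pushes are folded onto the head — the same LIFO order.
-- The Prop argument hs only justifies termination (every stacked position is in the 8x8 box or is start).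
def pvLoopA (maze : List (List Int)) (start goal : Int × Int)
    (stack : List ((Int × Int) × List (Int × Int)))
    (v : PySem.Set (Int × Int)) (expl : List (Int × Int))
    (hs : ∀ q ∈ stack, pvInBox q.1 = true ∨ q.1 = start) :
    (List (Int × Int)) × (Option (List (Int × Int))) :=
  match stack with
  | [] => (expl, none)
  | (pos, path) :: rest =>
    if hv : PySem.Set.contains v pos = true then
      pvLoopA maze start goal rest v expl (fun q hq => hs q (List.mem_cons_of_mem _ hq))
    else
      if pos = goal then (expl ++ [pos], some path)
      else
        pvLoopA maze start goal
          (pvDirsA.foldl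
            (fun s d =>
              if pvOkA maze (PySem.Set.add v pos) (pvNbr pos d) then
                (pvNbr pos d, path ++ [pvNbr pos d]) :: s
              else s)
            rest)
          (PySem.Set.add v pos) (expl ++ [pos])
          (by
            intro q hq
            rw [pvFoldlPush] at hq
            rcases List.mem_append.mp hq with h | h
            · left
              rcases List.mem_reverse.mp h with h
              rcases List.mem_map.mp h with ⟨d, hd, rfl⟩
              have hok : pvOkA maze (PySem.Set.add v pos) (pvNbr pos d) = true := by
                simpa using List.of_mem_filter hd
              exact pvInBox_of_okA _ _ _ hok
            · exact hs q (List.mem_cons_of_mem _ h))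
  termination_by pvMu start v * 4 + stack.length
  decreasing_by
  · simp
  · have hbox : pos ∈ pvBoxS start := by
      rcases hs (pos, path) (List.mem_cons_self ..) with h | h
      · exact pvMem_boxS_of_inBox start pos h
      · simp only at h; rw [h]; simp [pvBoxS]
    have hlt : pvMu start (PySem.Set.add v pos) < pvMu start v := by
      rw [pvAdd_eq_append v pos (by simpa using hv)]
      exact pvMu_add_lt start v pos hbox (by simpa using hv)
    have hlen := pvFoldlLen
      (f := fun s d =>
        if _h : pvOkA maze (PySem.Set.add v pos) (pvNbr pos d) = true then
          (pvNbr pos d, path ++ [pvNbr pos d]) :: s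
        else s)
      (by intro s a; dsimp only; split <;> simp) pvDirsA rest
    simp only [List.length_cons]
    have h4 : pvDirsA.length = 4 := rfl
    omega

def dfs (maze : List (List Int)) (start : Int × Int) (goal : Int × Int) :
    (List (Int × Int)) × (Option (List (Int × Int))) :=
  pvLoopA maze start goal [(start, [start])] PySem.Set.empty []
    (by intro q hq; simp only [List.mem_singleton] at hq; subst hq; right; rfl)

-- ===== PORT B =====
-- 'n not in visited and 0 <= n[0] < 8 and 0 <= n[1] < 8 and maze[n[0]][n[1]] != 1'
def pvFree (maze : List (List Int)) (v : PySem.Set (Int × Int)) (n : Int × Int) : Bool :=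
  !(PySem.Set.contains v n)
    && decide (0 ≤ n.1) && decide (n.1 < 8) && decide (0 ≤ n.2) && decide (n.2 < 8)
    && !(PySem.List.pyGetD (PySem.List.pyGetD maze n.1 []) n.2 1 == 1)

lemma pvInBox_of_free (maze : List (List Int)) (v : PySem.Set (Int × Int)) (n : Int × Int)
    (h : pvFree maze v n = true) : pvInBox n = true := by
  simp [pvFree] at h
  simp [pvInBox]
  tauto

-- Recursive DFS that carries no path; a found path is assembled back-to-front on the way
-- out of the recursion ('some [pos]' at the goal, 'pos :: tail' on each unwinding step).
-- The subtype only records that 'visited' grows (needed for termination); values are the port.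
mutual
def pvRecB (maze : List (List Int)) (start goal : Int × Int) (pos : Int × Int)
    (v : PySem.Set (Int × Int)) (expl : List (Int × Int))
    (hpos : pvInBox pos = true ∨ pos = start) :
    {r : PySem.Set (Int × Int) × List (Int × Int) × Option (List (Int × Int)) //
      ∀ x ∈ v, x ∈ r.1} :=
  if hv : PySem.Set.contains v pos = true then ⟨(v, expl, none), fun _ hx => hx⟩
  else
    if pos = goal then
      ⟨(PySem.Set.add v pos, expl ++ [pos], some [pos]),
        fun x hx => by
          rw [pvAdd_eq_append v pos (by simpa using hv)]
          exact List.mem_append_left _ hx⟩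
    else
      let r := pvRunB maze start goal
        [(pos.1, pos.2 + 1), (pos.1, pos.2 - 1), (pos.1 + 1, pos.2), (pos.1 - 1, pos.2)]
        (PySem.Set.add v pos) (expl ++ [pos])
      ⟨(r.1.1, r.1.2.1, (r.1.2.2).map (fun tail => pos :: tail)),
        fun x hx => r.2 x (by
          rw [pvAdd_eq_append v pos (by simpa using hv)]
          exact List.mem_append_left _ hx)⟩
termination_by (pvMu start v * 10, 0)
decreasing_by
  have hbox : pos ∈ pvBoxS start := by
    rcases hpos with h | h
    · exact pvMem_boxS_of_inBox start pos h
    · rw [h]; simp [pvBoxS]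
  have hlt : pvMu start (PySem.Set.add v pos) < pvMu start v := by
    rw [pvAdd_eq_append v pos (by simpa using hv)]
    exact pvMu_add_lt start v pos hbox (by simpa using hv)
  apply Prod.Lex.left
  omega

def pvRunB (maze : List (List Int)) (start goal : Int × Int)
    (ns : List (Int × Int))
    (v : PySem.Set (Int × Int)) (expl : List (Int × Int)) :
    {r : PySem.Set (Int × Int) × List (Int × Int) × Option (List (Int × Int)) //
      ∀ x ∈ v, x ∈ r.1} :=
  match ns with
  | [] => ⟨(v, expl, none), fun _ hx => hx⟩
  | n :: rest =>
    if hok : pvFree maze v n = true then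
      match pvRecB maze start goal n v expl (Or.inl (pvInBox_of_free maze v n hok)) with
      | ⟨(v1, e1, some tail), h1⟩ => ⟨(v1, e1, some tail), h1⟩
      | ⟨(v1, e1, none), h1⟩ =>
        let r2 := pvRunB maze start goal rest v1 e1
        ⟨r2.1, fun x hx => r2.2 x (h1 x hx)⟩
    else pvRunB maze start goal rest v expl
termination_by (pvMu start v * 10, ns.length + 1)
decreasing_by
  · apply Prod.Lex.right
    omega
  · have hle : pvMu start v1 ≤ pvMu start v := pvMu_le_of_subset start v v1 h1
    rcases Nat.lt_or_ge (pvMu start v1) (pvMu start v) with h | h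
    · apply Prod.Lex.left; omega
    · have heq : pvMu start v1 = pvMu start v := le_antisymm hle h
      rw [heq]; apply Prod.Lex.right; simp only [List.length_cons]; omega
  · apply Prod.Lex.right
    simp only [List.length_cons]; omega
end

def dfs_alt (maze : List (List Int)) (start : Int × Int) (goal : Int × Int) :
    (List (Int × Int)) × (Option (List (Int × Int))) :=
  ((pvRecB maze start goal start PySem.Set.empty [] (Or.inr rfl)).1.2.1,
   (pvRecB maze start goal start PySem.Set.empty [] (Or.inr rfl)).1.2.2)

-- ===== PRECONDITION & SPEC =====
-- Pre_dfs excludes exactly the inputs where A's eager neighbour lookup maze[nx][ny] can hit a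
-- missing row/cell (IndexError): it demands the full 8x8 grid unless the traversal can never
-- touch the box (start = goal, or no neighbour of start lies in the box); this also excludes
-- some smaller mazes where walls happen to shield the missing cells and A still returns.
def Pre_dfs (maze : List (List Int)) (start : Int × Int) (goal : Int × Int) : Prop :=
  (8 ≤ maze.length ∧ ∀ row ∈ maze.take 8, 8 ≤ row.length)
  ∨ start = goal
  ∨ (∀ d ∈ [((-1 : Int), (0 : Int)), (1, 0), (0, -1), (0, 1)],
      ¬ (0 ≤ start.1 + d.1 ∧ start.1 + d.1 < 8 ∧ 0 ≤ start.2 + d.2 ∧ start.2 + d.2 < 8))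
instance (maze : List (List Int)) (start : Int × Int) (goal : Int × Int) : Decidable (Pre_dfs maze start goal) := by unfold Pre_dfs; infer_instance

def pvWitness_dfs : List (List Int) × (Int × Int) × (Int × Int) :=
  ([[0,0,0,0,0,0,0,0],[0,1,1,1,1,1,1,0],[0,0,0,0,0,0,1,0],[1,1,1,1,1,0,1,0],
    [0,0,0,0,1,0,1,0],[0,1,1,0,1,0,1,0],[0,1,0,0,1,0,0,0],[0,1,1,1,1,1,1,0]],
   (0, 0), (6, 2))

def Spec_dfs (maze : List (List Int)) (start : Int × Int) (goal : Int × Int) (out : (List (Int × Int)) × (Option (List (Int × Int)))) : Prop := out = dfs_alt maze start goal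
instance (maze : List (List Int)) (start : Int × Int) (goal : Int × Int) (out : (List (Int × Int)) × (Option (List (Int × Int)))) : Decidable (Spec_dfs maze start goal out) := by unfold Spec_dfs; infer_instance

-- ===== CLAIM (what is proved, stated in full; the proofs are below) =====
def Claim_equal_dfs : Prop := ∀ (maze : List (List Int)) (start : Int × Int) (goal : Int × Int), Dom_dfs maze start goal → Pre_dfs maze start goal → Spec_dfs maze start goal (dfs maze start goal)

-- ===== LEMMAS AND PROOFS =====

-- Proof-only intermediate: the PATH-THREADING recursive DFS (carries 'path' downwards like
-- A's stack entries do). It is related to A's loop by pvKey and to B's recursion by pvCorr.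
def pvDirsB : List (Int × Int) := [(0, 1), (0, -1), (1, 0), (-1, 0)]

def pvOkB (maze : List (List Int)) (v : PySem.Set (Int × Int)) (n : Int × Int) : Bool :=
  pvInBox n && !(pvCell maze n == 1) && !(PySem.Set.contains v n)

lemma pvInBox_of_okB (maze : List (List Int)) (v : PySem.Set (Int × Int)) (n : Int × Int)
    (h : pvOkB maze v n = true) : pvInBox n = true := by
  simp [pvOkB] at h; simp [h]

mutual
def pvRecP (maze : List (List Int)) (start goal : Int × Int)
    (pos : Int × Int) (path : List (Int × Int))
    (v : PySem.Set (Int × Int)) (expl : List (Int × Int))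
    (hpos : pvInBox pos = true ∨ pos = start) :
    {r : PySem.Set (Int × Int) × List (Int × Int) × Option (List (Int × Int)) //
      ∀ x ∈ v, x ∈ r.1} :=
  if hv : PySem.Set.contains v pos = true then ⟨(v, expl, none), fun _ hx => hx⟩
  else
    if pos = goal then
      ⟨(PySem.Set.add v pos, expl ++ [pos], some path),
        fun x hx => by
          rw [pvAdd_eq_append v pos (by simpa using hv)]
          exact List.mem_append_left _ hx⟩
    else
      let r := pvGoP maze start goal pos path pvDirsB (PySem.Set.add v pos) (expl ++ [pos])
      ⟨r.1, fun x hx => r.2 x (by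
        rw [pvAdd_eq_append v pos (by simpa using hv)]
        exact List.mem_append_left _ hx)⟩
termination_by (pvMu start v * 10, 0)
decreasing_by
  have hbox : pos ∈ pvBoxS start := by
    rcases hpos with h | h
    · exact pvMem_boxS_of_inBox start pos h
    · rw [h]; simp [pvBoxS]
  have hlt : pvMu start (PySem.Set.add v pos) < pvMu start v := by
    rw [pvAdd_eq_append v pos (by simpa using hv)]
    exact pvMu_add_lt start v pos hbox (by simpa using hv)
  apply Prod.Lex.left
  omega

def pvGoP (maze : List (List Int)) (start goal : Int × Int)
    (pos : Int × Int) (path : List (Int × Int)) (ds : List (Int × Int))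
    (v : PySem.Set (Int × Int)) (expl : List (Int × Int)) :
    {r : PySem.Set (Int × Int) × List (Int × Int) × Option (List (Int × Int)) //
      ∀ x ∈ v, x ∈ r.1} :=
  match ds with
  | [] => ⟨(v, expl, none), fun _ hx => hx⟩
  | d :: ds' =>
    if hok : pvOkB maze v (pvNbr pos d) = true then
      match pvRecP maze start goal (pvNbr pos d) (path ++ [pvNbr pos d]) v expl
          (Or.inl (pvInBox_of_okB maze v _ hok)) with
      | ⟨(v1, e1, some r), h1⟩ => ⟨(v1, e1, some r), h1⟩
      | ⟨(v1, e1, none), h1⟩ =>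
        let r2 := pvGoP maze start goal pos path ds' v1 e1
        ⟨r2.1, fun x hx => r2.2 x (h1 x hx)⟩
    else pvGoP maze start goal pos path ds' v expl
termination_by (pvMu start v * 10, ds.length + 1)
decreasing_by
  · apply Prod.Lex.right
    omega
  · have hle : pvMu start v1 ≤ pvMu start v := pvMu_le_of_subset start v v1 h1
    rcases Nat.lt_or_ge (pvMu start v1) (pvMu start v) with h | h
    · apply Prod.Lex.left; omega
    · have heq : pvMu start v1 = pvMu start v := le_antisymm hle h
      rw [heq]; apply Prod.Lex.right; simp only [List.length_cons]; omega
  · apply Prod.Lex.right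
    simp only [List.length_cons]; omega
end

-- the stack entries A pushes while expanding pos, read from the stack top (= P's direction order)
def pvEnts (maze : List (List Int)) (v : PySem.Set (Int × Int))
    (pos : Int × Int) (path : List (Int × Int)) (ds : List (Int × Int)) :
    List ((Int × Int) × List (Int × Int)) :=
  (ds.filter (fun d => pvOkA maze v (pvNbr pos d))).map
    (fun d => (pvNbr pos d, path ++ [pvNbr pos d]))

lemma pvEnts_cons (maze : List (List Int)) (v : PySem.Set (Int × Int))
    (pos : Int × Int) (path : List (Int × Int)) (d : Int × Int) (ds : List (Int × Int)) :
    pvEnts maze v pos path (d :: ds)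
      = if pvOkA maze v (pvNbr pos d) then
          (pvNbr pos d, path ++ [pvNbr pos d]) :: pvEnts maze v pos path ds
        else pvEnts maze v pos path ds := by
  simp only [pvEnts, List.filter_cons]
  split <;> simp

lemma pvEnts_pos (maze : List (List Int)) (v : PySem.Set (Int × Int))
    (pos : Int × Int) (path : List (Int × Int)) (ds : List (Int × Int))
    (q : (Int × Int) × List (Int × Int)) (hq : q ∈ pvEnts maze v pos path ds) :
    pvInBox q.1 = true := by
  rcases List.mem_map.mp hq with ⟨d, hd, rfl⟩
  have hok : pvOkA maze v (pvNbr pos d) = true := by simpa using List.of_mem_filter hd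
  exact pvInBox_of_okA _ _ _ hok

lemma pvEnts_reverse (maze : List (List Int)) (v : PySem.Set (Int × Int))
    (pos : Int × Int) (path : List (Int × Int)) :
    (pvEnts maze v pos path pvDirsA).reverse = pvEnts maze v pos path pvDirsB := by
  have h : pvDirsA.reverse = pvDirsB := rfl
  simp only [pvEnts, ← h, List.filter_reverse, List.map_reverse]

lemma pvContains_iff (v : PySem.Set (Int × Int)) (x : Int × Int) :
    PySem.Set.contains v x = true ↔ x ∈ v := List.contains_iff_mem

lemma pvOk_false_mono (maze : List (List Int)) (v₀ v : PySem.Set (Int × Int)) (n : Int × Int)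
    (h0 : pvOkA maze v₀ n = false) (hsub : ∀ x ∈ v₀, x ∈ v) : pvOkA maze v n = false := by
  cases h1 : pvInBox n <;> cases h2 : (pvCell maze n == 1) <;>
    simp [pvOkA, h1, h2] at h0 ⊢
  exact hsub n h0

lemma pvOk_true_mono (maze : List (List Int)) (v₀ v : PySem.Set (Int × Int)) (n : Int × Int)
    (h0 : pvOkA maze v₀ n = true) (hc : PySem.Set.contains v n = false) :
    pvOkA maze v n = true := by
  simp [pvOkA] at h0 ⊢
  refine ⟨h0.1, fun hm => ?_⟩
  rw [(pvContains_iff v n).mpr hm] at hc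
  exact absurd hc (by decide)

lemma pvLoopA_congr (maze : List (List Int)) (start goal : Int × Int)
    (s1 s2 : List ((Int × Int) × List (Int × Int)))
    (v : PySem.Set (Int × Int)) (expl : List (Int × Int))
    (h1 : ∀ q ∈ s1, pvInBox q.1 = true ∨ q.1 = start) (h : s1 = s2) :
    pvLoopA maze start goal s1 v expl h1 = pvLoopA maze start goal s2 v expl (h ▸ h1) := by
  subst h; rfl

-- value-level unfolding lemmas for the two recursions (the subtype proofs drop out)
lemma pvRecP_val_goal (maze : List (List Int)) (start goal : Int × Int)
    (pos : Int × Int) (path : List (Int × Int)) (v : PySem.Set (Int × Int))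
    (expl : List (Int × Int)) (hpos : pvInBox pos = true ∨ pos = start)
    (hv : ¬ PySem.Set.contains v pos = true) (hg : pos = goal) :
    (pvRecP maze start goal pos path v expl hpos).1
      = (PySem.Set.add v pos, expl ++ [pos], some path) := by
  rw [pvRecP.eq_def, dif_neg hv, if_pos hg]

lemma pvRecP_val_go (maze : List (List Int)) (start goal : Int × Int)
    (pos : Int × Int) (path : List (Int × Int)) (v : PySem.Set (Int × Int))
    (expl : List (Int × Int)) (hpos : pvInBox pos = true ∨ pos = start)
    (hv : ¬ PySem.Set.contains v pos = true) (hg : pos ≠ goal) :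
    (pvRecP maze start goal pos path v expl hpos).1
      = (pvGoP maze start goal pos path pvDirsB (PySem.Set.add v pos) (expl ++ [pos])).1 := by
  rw [pvRecP.eq_def, dif_neg hv, if_neg hg]

lemma pvGoP_val_skip (maze : List (List Int)) (start goal : Int × Int)
    (pos : Int × Int) (path : List (Int × Int)) (d : Int × Int) (ds' : List (Int × Int))
    (v : PySem.Set (Int × Int)) (expl : List (Int × Int))
    (hok : ¬ pvOkB maze v (pvNbr pos d) = true) :
    (pvGoP maze start goal pos path (d :: ds') v expl).1
      = (pvGoP maze start goal pos path ds' v expl).1 := by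
  rw [pvGoP.eq_def]
  simp only [dif_neg hok]

lemma pvGoP_val_step (maze : List (List Int)) (start goal : Int × Int)
    (pos : Int × Int) (path : List (Int × Int)) (d : Int × Int) (ds' : List (Int × Int))
    (v : PySem.Set (Int × Int)) (expl : List (Int × Int))
    (hok : pvOkB maze v (pvNbr pos d) = true) :
    (pvGoP maze start goal pos path (d :: ds') v expl).1
      = (match (pvRecP maze start goal (pvNbr pos d) (path ++ [pvNbr pos d]) v expl
            (Or.inl (pvInBox_of_okB maze v _ hok))).1 with
         | (v1, e1, some r) => (v1, e1, some r)
         | (v1, e1, none) => (pvGoP maze start goal pos path ds' v1 e1).1) := by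
  rw [pvGoP.eq_def]
  simp only [dif_pos hok]
  rcases pvRecP maze start goal (pvNbr pos d) (path ++ [pvNbr pos d]) v expl
      (Or.inl (pvInBox_of_okB maze v _ hok)) with ⟨⟨v1, e1, r1⟩, h1⟩
  cases r1 <;> rfl

lemma pvRecB_val_goal (maze : List (List Int)) (start goal : Int × Int)
    (pos : Int × Int) (v : PySem.Set (Int × Int))
    (expl : List (Int × Int)) (hpos : pvInBox pos = true ∨ pos = start)
    (hv : ¬ PySem.Set.contains v pos = true) (hg : pos = goal) :
    (pvRecB maze start goal pos v expl hpos).1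
      = (PySem.Set.add v pos, expl ++ [pos], some [pos]) := by
  rw [pvRecB.eq_def, dif_neg hv, if_pos hg]

lemma pvRecB_val_go (maze : List (List Int)) (start goal : Int × Int)
    (pos : Int × Int) (v : PySem.Set (Int × Int))
    (expl : List (Int × Int)) (hpos : pvInBox pos = true ∨ pos = start)
    (hv : ¬ PySem.Set.contains v pos = true) (hg : pos ≠ goal) :
    (pvRecB maze start goal pos v expl hpos).1
      = (let r := (pvRunB maze start goal
            [(pos.1, pos.2 + 1), (pos.1, pos.2 - 1), (pos.1 + 1, pos.2), (pos.1 - 1, pos.2)]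
            (PySem.Set.add v pos) (expl ++ [pos])).1
         (r.1, r.2.1, (r.2.2).map (fun tail => pos :: tail))) := by
  rw [pvRecB.eq_def, dif_neg hv, if_neg hg]

lemma pvRunB_val_skip (maze : List (List Int)) (start goal : Int × Int)
    (n : Int × Int) (rest : List (Int × Int))
    (v : PySem.Set (Int × Int)) (expl : List (Int × Int))
    (hok : ¬ pvFree maze v n = true) :
    (pvRunB maze start goal (n :: rest) v expl).1
      = (pvRunB maze start goal rest v expl).1 := by
  rw [pvRunB.eq_def]
  simp only [dif_neg hok]

lemma pvRunB_val_step (maze : List (List Int)) (start goal : Int × Int)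
    (n : Int × Int) (rest : List (Int × Int))
    (v : PySem.Set (Int × Int)) (expl : List (Int × Int))
    (hok : pvFree maze v n = true) :
    (pvRunB maze start goal (n :: rest) v expl).1
      = (match (pvRecB maze start goal n v expl
            (Or.inl (pvInBox_of_free maze v n hok))).1 with
         | (v1, e1, some tail) => (v1, e1, some tail)
         | (v1, e1, none) => (pvRunB maze start goal rest v1 e1).1) := by
  rw [pvRunB.eq_def]
  simp only [dif_pos hok]
  rcases pvRecB maze start goal n v expl (Or.inl (pvInBox_of_free maze v n hok))
    with ⟨⟨v1, e1, r1⟩, h1⟩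
  cases r1 <;> rfl

lemma pvGoP_mono (maze : List (List Int)) (start goal : Int × Int)
    (pos : Int × Int) (path : List (Int × Int)) (ds : List (Int × Int))
    (v : PySem.Set (Int × Int)) (expl : List (Int × Int)) :
    ∀ x ∈ v, x ∈ (pvGoP maze start goal pos path ds v expl).1.1 :=
  (pvGoP maze start goal pos path ds v expl).2

lemma pvRunB_mono (maze : List (List Int)) (start goal : Int × Int)
    (ns : List (Int × Int))
    (v : PySem.Set (Int × Int)) (expl : List (Int × Int)) :
    ∀ x ∈ v, x ∈ (pvRunB maze start goal ns v expl).1.1 :=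
  (pvRunB maze start goal ns v expl).2

-- B's inline neighbour tuples are exactly the P-version direction offsets
lemma pvNbrsList (pos : Int × Int) :
    [(pos.1, pos.2 + 1), (pos.1, pos.2 - 1), (pos.1 + 1, pos.2), (pos.1 - 1, pos.2)]
      = pvDirsB.map (pvNbr pos) := by
  simp [pvDirsB, pvNbr]
  exact ⟨by ring, by ring⟩

-- B's condition is A's (hence P's), reordered
lemma pvFree_eq (maze : List (List Int)) (v : PySem.Set (Int × Int)) (n : Int × Int) :
    pvFree maze v n = pvOkB maze v n := by
  apply Bool.eq_iff_iff.mpr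
  simp [pvFree, pvOkB, pvInBox, pvCell]
  tauto

-- ===== P = B: the path-threading recursion and the cons-on-unwind recursion agree =====
theorem pvCorr (maze : List (List Int)) (start goal : Int × Int) :
    ∀ (N : Nat) (ds : List (Int × Int)) (v : PySem.Set (Int × Int))
      (pos : Int × Int) (path expl : List (Int × Int)),
      pvMu start v ≤ N →
      (pvGoP maze start goal pos path ds v expl).1
        = ((pvRunB maze start goal (ds.map (pvNbr pos)) v expl).1.1,
           (pvRunB maze start goal (ds.map (pvNbr pos)) v expl).1.2.1,
           ((pvRunB maze start goal (ds.map (pvNbr pos)) v expl).1.2.2).map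
             (fun t => path ++ t)) := by
  intro N
  induction N using Nat.strong_induction_on with
  | _ N ihN =>
  intro ds
  induction ds with
  | nil =>
    intro v pos path expl hμ
    rw [pvGoP.eq_def, pvRunB.eq_def]
    rfl
  | cons d ds' ihds =>
    intro v pos path expl hμ
    set n := pvNbr pos d with hn
    rw [show (d :: ds').map (pvNbr pos) = n :: ds'.map (pvNbr pos) from rfl]
    by_cases hok : pvOkB maze v n = true
    · have hfree : pvFree maze v n = true := by rw [pvFree_eq]; exact hok
      have hv : ¬ PySem.Set.contains v n = true := by
        intro hc
        simp [pvFree] at hfree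
        exact hfree.1.1.1.1.1 ((pvContains_iff v n).mp hc)
      rw [show (pvGoP maze start goal pos path (d :: ds') v expl).1 = _ from
        pvGoP_val_step maze start goal pos path d ds' v expl hok]
      rw [show (pvRunB maze start goal (n :: ds'.map (pvNbr pos)) v expl).1 = _ from
        pvRunB_val_step maze start goal n (ds'.map (pvNbr pos)) v expl hfree]
      by_cases hg : n = goal
      · rw [pvRecP_val_goal maze start goal n (path ++ [n]) v expl _ hv hg,
          pvRecB_val_goal maze start goal n v expl _ hv hg]
        simp
      · rw [pvRecP_val_go maze start goal n (path ++ [n]) v expl _ hv hg,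
          pvRecB_val_go maze start goal n v expl _ hv hg]
        have hmem : PySem.Set.contains v n = false := by simpa using hv
        have hboxn : n ∈ pvBoxS start := pvMem_boxS_of_inBox start n (pvInBox_of_okB _ _ _ hok)
        have hmu' : pvMu start (PySem.Set.add v n) < pvMu start v := by
          rw [pvAdd_eq_append v n hmem]
          exact pvMu_add_lt start v n hboxn hmem
        have hIH := ihN (pvMu start (PySem.Set.add v n)) (by omega) pvDirsB
          (PySem.Set.add v n) n (path ++ [n]) (expl ++ [n]) (le_refl _)
        rw [← pvNbrsList n] at hIH
        rw [hIH]
        have hmono := pvRunB_mono maze start goal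
          [(n.1, n.2 + 1), (n.1, n.2 - 1), (n.1 + 1, n.2), (n.1 - 1, n.2)]
          (PySem.Set.add v n) (expl ++ [n])
        rcases hrun : (pvRunB maze start goal
            [(n.1, n.2 + 1), (n.1, n.2 - 1), (n.1 + 1, n.2), (n.1 - 1, n.2)]
            (PySem.Set.add v n) (expl ++ [n])).1 with ⟨v1, e1, r1⟩
        rw [hrun] at hmono
        cases r1 with
        | some t => simp
        | none =>
          dsimp only [Option.map_none]
          have hmono' : ∀ x ∈ v, x ∈ v1 := by
            intro x hx
            apply hmono
            rw [pvAdd_eq_append v n hmem]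
            exact List.mem_append_left _ hx
          have hmu1 : pvMu start v1 ≤ pvMu start (PySem.Set.add v n) :=
            pvMu_le_of_subset start _ _ hmono
          exact ihds v1 pos path e1 (by omega)
    · have hfree : ¬ pvFree maze v n = true := by rw [pvFree_eq]; exact hok
      rw [show (pvGoP maze start goal pos path (d :: ds') v expl).1 = _ from
          pvGoP_val_skip maze start goal pos path d ds' v expl hok,
        show (pvRunB maze start goal (n :: ds'.map (pvNbr pos)) v expl).1 = _ from
          pvRunB_val_skip maze start goal n (ds'.map (pvNbr pos)) v expl hfree]
      exact ihds v pos path expl hμ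

-- ===== A = P: the stack loop and the path-threading recursion agree =====
theorem pvKey (maze : List (List Int)) (start goal : Int × Int) :
    ∀ (N : Nat) (ds : List (Int × Int)) (v v₀ : PySem.Set (Int × Int))
      (pos : Int × Int) (path : List (Int × Int)) (expl : List (Int × Int))
      (rest : List ((Int × Int) × List (Int × Int)))
      (hμ : pvMu start v ≤ N)
      (hv₀ : ∀ x ∈ v₀, x ∈ v)
      (hstack : ∀ q ∈ pvEnts maze v₀ pos path ds ++ rest, pvInBox q.1 = true ∨ q.1 = start)
      (hrest : ∀ q ∈ rest, pvInBox q.1 = true ∨ q.1 = start),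
      pvLoopA maze start goal (pvEnts maze v₀ pos path ds ++ rest) v expl hstack
        = (match (pvGoP maze start goal pos path ds v expl).1 with
           | (_, e1, some r) => (e1, some r)
           | (v1, e1, none) => pvLoopA maze start goal rest v1 e1 hrest) := by
  intro N
  induction N using Nat.strong_induction_on with
  | _ N ihN =>
  intro ds
  induction ds with
  | nil =>
    intro v v₀ pos path expl rest hμ hv₀ hstack hrest
    rw [pvGoP.eq_def]
    rfl
  | cons d ds' ihds =>
    intro v v₀ pos path expl rest hμ hv₀ hstack hrest
    set n := pvNbr pos d with hn
    have hrest2 : ∀ q ∈ pvEnts maze v₀ pos path ds' ++ rest,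
        pvInBox q.1 = true ∨ q.1 = start := by
      intro q hq
      rcases List.mem_append.mp hq with hq | hq
      · exact Or.inl (pvEnts_pos _ _ _ _ _ _ hq)
      · exact hrest q hq
    by_cases hok0 : pvOkA maze v₀ n = true
    · -- the entry for d is on A's stack
      have hE : pvEnts maze v₀ pos path (d :: ds') ++ rest
          = (n, path ++ [n]) :: (pvEnts maze v₀ pos path ds' ++ rest) := by
        rw [pvEnts_cons, if_pos hok0, ← hn]
        rfl
      rw [pvLoopA_congr maze start goal _ _ v expl hstack hE]
      by_cases hmem : PySem.Set.contains v n = true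
      · -- already visited: A pops and skips, P's ok-test fails
        have hokv : ¬ pvOkB maze v n = true := by
          show ¬ pvOkA maze v n = true
          simp [pvOkA]
          intro _ _
          exact (pvContains_iff v n).mp hmem
        rw [pvLoopA, dif_pos hmem]
        rw [show (pvGoP maze start goal pos path (d :: ds') v expl).1
            = (pvGoP maze start goal pos path ds' v expl).1 from
          pvGoP_val_skip maze start goal pos path d ds' v expl (by rw [← hn]; exact hokv)]
        exact ihds v v₀ pos path expl rest hμ hv₀ hrest2 hrest
      · -- unvisited: both sides actually visit n
        have hokv : pvOkA maze v n = true := pvOk_true_mono maze v₀ v n hok0 (by simpa using hmem)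
        have hboxn : n ∈ pvBoxS start := pvMem_boxS_of_inBox start n (pvInBox_of_okA _ _ _ hokv)
        have hvadd : PySem.Set.add v n = v ++ [n] := pvAdd_eq_append v n (by simpa using hmem)
        have hmu' : pvMu start (PySem.Set.add v n) < pvMu start v := by
          rw [hvadd]; exact pvMu_add_lt start v n hboxn (by simpa using hmem)
        rw [pvLoopA, dif_neg hmem]
        rw [show (pvGoP maze start goal pos path (d :: ds') v expl).1 = _ from
          pvGoP_val_step maze start goal pos path d ds' v expl (by rw [← hn]; exact hokv)]
        simp only [← hn]
        by_cases hg : n = goal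
        · rw [if_pos hg]
          rw [pvRecP_val_goal maze start goal n (path ++ [n]) v expl _ hmem hg]
        · rw [if_neg hg]
          rw [pvRecP_val_go maze start goal n (path ++ [n]) v expl _ hmem hg]
          have hpush : (pvDirsA.foldl
              (fun s dd =>
                if pvOkA maze (PySem.Set.add v n) (pvNbr n dd) then
                  (pvNbr n dd, (path ++ [n]) ++ [pvNbr n dd]) :: s
                else s)
              (pvEnts maze v₀ pos path ds' ++ rest))
              = pvEnts maze (PySem.Set.add v n) n (path ++ [n]) pvDirsB
                  ++ (pvEnts maze v₀ pos path ds' ++ rest) := by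
            rw [pvFoldlPush (fun dd => pvOkA maze (PySem.Set.add v n) (pvNbr n dd))
              (fun dd => (pvNbr n dd, (path ++ [n]) ++ [pvNbr n dd]))]
            rw [show ((pvDirsA.filter fun dd => pvOkA maze (PySem.Set.add v n) (pvNbr n dd)).map
                  fun dd => (pvNbr n dd, (path ++ [n]) ++ [pvNbr n dd])).reverse
                = pvEnts maze (PySem.Set.add v n) n (path ++ [n]) pvDirsB from
              pvEnts_reverse maze _ n (path ++ [n])]
          rw [pvLoopA_congr maze start goal _ _ (PySem.Set.add v n) (expl ++ [n]) _ hpush]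
          have hIH := ihN (pvMu start (PySem.Set.add v n)) (by omega)
            pvDirsB (PySem.Set.add v n) (PySem.Set.add v n) n (path ++ [n]) (expl ++ [n])
            (pvEnts maze v₀ pos path ds' ++ rest) (le_refl _) (fun x hx => hx)
            (by
              intro q hq
              rcases List.mem_append.mp hq with hq | hq
              · exact Or.inl (pvEnts_pos _ _ _ _ _ _ hq)
              · exact hrest2 q hq)
            hrest2
          rw [hIH]
          have hmono := pvGoP_mono maze start goal n (path ++ [n]) pvDirsB
            (PySem.Set.add v n) (expl ++ [n])
          rcases hgo : (pvGoP maze start goal n (path ++ [n]) pvDirsB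
              (PySem.Set.add v n) (expl ++ [n])).1 with ⟨v1, e1, r1⟩
          rw [hgo] at hmono
          cases r1 with
          | some r => rfl
          | none =>
            dsimp only
            have hv₀1 : ∀ x ∈ v₀, x ∈ v1 := by
              intro x hx
              apply hmono
              rw [hvadd]
              exact List.mem_append_left _ (hv₀ x hx)
            have hmu1 : pvMu start v1 ≤ pvMu start (PySem.Set.add v n) :=
              pvMu_le_of_subset start _ _ hmono
            exact ihN (pvMu start v1) (by omega) ds' v1 v₀ pos path e1 rest
              (le_refl _) hv₀1 hrest2 hrest
    · -- the entry for d is filtered out on both sides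
      have hokv : ¬ pvOkB maze v n = true := by
        show ¬ pvOkA maze v n = true
        rw [pvOk_false_mono maze v₀ v n (by simpa using hok0) hv₀]
        simp
      have hE : pvEnts maze v₀ pos path (d :: ds') ++ rest
          = pvEnts maze v₀ pos path ds' ++ rest := by
        rw [pvEnts_cons, if_neg (by simpa using hok0)]
      rw [pvLoopA_congr maze start goal _ _ v expl hstack hE]
      rw [show (pvGoP maze start goal pos path (d :: ds') v expl).1
          = (pvGoP maze start goal pos path ds' v expl).1 from
        pvGoP_val_skip maze start goal pos path d ds' v expl (by rw [← hn]; exact hokv)]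
      exact ihds v v₀ pos path expl rest hμ hv₀ hrest2 hrest

-- ===== VERDICT (by name: the statement is the Claim_ definition above) =====
theorem dfs_spec : Claim_equal_dfs := by
  unfold Claim_equal_dfs
  intro maze start goal _ _
  unfold Spec_dfs dfs dfs_alt
  have hce : ¬ PySem.Set.contains PySem.Set.empty start = true := fun h => nomatch h
  rw [pvLoopA, dif_neg hce]
  by_cases hg : start = goal
  · rw [if_pos hg,
      pvRecB_val_goal maze start goal start PySem.Set.empty [] (Or.inr rfl) hce hg]
  · rw [if_neg hg]
    have hpush : (pvDirsA.foldl
        (fun s dd =>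
          if pvOkA maze (PySem.Set.add PySem.Set.empty start) (pvNbr start dd) then
            (pvNbr start dd, [start] ++ [pvNbr start dd]) :: s
          else s)
        ([] : List ((Int × Int) × List (Int × Int))))
        = pvEnts maze (PySem.Set.add PySem.Set.empty start) start [start] pvDirsB ++ [] := by
      rw [pvFoldlPush (fun dd => pvOkA maze (PySem.Set.add PySem.Set.empty start) (pvNbr start dd))
        (fun dd => (pvNbr start dd, [start] ++ [pvNbr start dd]))]
      rw [show ((pvDirsA.filter fun dd =>
            pvOkA maze (PySem.Set.add PySem.Set.empty start) (pvNbr start dd)).map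
            fun dd => (pvNbr start dd, [start] ++ [pvNbr start dd])).reverse
          = pvEnts maze (PySem.Set.add PySem.Set.empty start) start [start] pvDirsB from
        pvEnts_reverse maze _ start [start]]
    rw [pvLoopA_congr maze start goal _ _
      (PySem.Set.add PySem.Set.empty start) ([] ++ [start]) _ hpush]
    have hK := pvKey maze start goal (pvMu start (PySem.Set.add PySem.Set.empty start))
      pvDirsB (PySem.Set.add PySem.Set.empty start) (PySem.Set.add PySem.Set.empty start)
      start [start] ([] ++ [start]) [] (le_refl _) (fun x hx => hx)
      (by
        intro q hq
        rcases List.mem_append.mp hq with hq | hq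
        · exact Or.inl (pvEnts_pos _ _ _ _ _ _ hq)
        · exact absurd hq (List.not_mem_nil))
      (fun q hq => absurd hq (List.not_mem_nil))
    rw [hK]
    rw [pvRecB_val_go maze start goal start PySem.Set.empty [] (Or.inr rfl) hce hg]
    have hC := pvCorr maze start goal (pvMu start (PySem.Set.add PySem.Set.empty start))
      pvDirsB (PySem.Set.add PySem.Set.empty start) start [start] ([] ++ [start]) (le_refl _)
    rw [← pvNbrsList start] at hC
    rw [hC]
    rcases hrun : (pvRunB maze start goal
        [(start.1, start.2 + 1), (start.1, start.2 - 1),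
         (start.1 + 1, start.2), (start.1 - 1, start.2)]
        (PySem.Set.add PySem.Set.empty start) ([] ++ [start])).1 with ⟨v1, e1, r1⟩
    cases r1 with
    | some t => simp
    | none => dsimp only [Option.map_none]; rw [pvLoopA.eq_def]
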